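-- pv_equiv track=rewrite | github.com/kh277/BOJ | 백준/Silver/24938. 키트 분배하기/키트 분배하기.py | solve
-- ===== SOURCE A (Python) =====
-- def solve(N, A):
--     need = sum(A)//N
--     result = 0
--     left = 0
--     for i in range(N):
--         gap = need - A[i]
--
--         left += gap
--         result += abs(left)
--
--     return result
-- ===== SOURCE B (Python) =====
-- def solve(N, A):
--     need = sum(A) // N
--     total = sum(need - A[i] for i in range(N))
--     result = 0
--     suf = 0
--     for i in reversed(range(N)):
--         result += abs(total - suf)
--         suf += need - A[i]
--     return result
-- ===== Notes on version B (the rewrite author's own statement) =====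
-- stated objective: alternative
-- what changed: B first computes the total gap in one pass, then traverses the list BACK-TO-FRONT with a suffix-gap accumulator, summing abs(total - suffix) instead of A's forward running-left accumulator; correctness rests on total - suffix(i+1) = prefix(i).
import Mathlib
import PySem

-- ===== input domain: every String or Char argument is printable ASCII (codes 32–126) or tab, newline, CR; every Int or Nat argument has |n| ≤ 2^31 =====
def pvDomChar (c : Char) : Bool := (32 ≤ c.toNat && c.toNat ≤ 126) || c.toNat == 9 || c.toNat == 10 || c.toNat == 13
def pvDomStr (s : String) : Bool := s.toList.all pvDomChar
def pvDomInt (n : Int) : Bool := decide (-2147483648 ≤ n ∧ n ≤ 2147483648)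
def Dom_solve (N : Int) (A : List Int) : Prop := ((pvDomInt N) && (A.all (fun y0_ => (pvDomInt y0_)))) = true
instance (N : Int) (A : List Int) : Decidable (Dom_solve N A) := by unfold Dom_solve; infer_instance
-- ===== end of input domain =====

-- B computes the total gap first and then walks the list BACK-TO-FRONT with a
-- suffix-gap accumulator (|total - suffix| per step) instead of A's forward
-- running-left accumulator (same cost, different traversal).

-- ===== PORT A =====
def solve (N : Int) (A : List Int) : Int :=
  let need := PySem.Int.floordiv A.sum N
  let rl := (PySem.List.pyRange 0 N 1).foldl
    (fun (s : Int × Int) i =>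
      let gap := need - PySem.List.pyGetD A i 0
      let left := s.2 + gap
      (s.1 + |left|, left)) (0, 0)
  rl.1

-- ===== PORT B =====
def solve_alt (N : Int) (A : List Int) : Int :=
  let need := PySem.Int.floordiv A.sum N
  let total := ((PySem.List.pyRange 0 N 1).map
    (fun i => need - PySem.List.pyGetD A i 0)).sum
  let rs := (PySem.List.pyRange 0 N 1).reverse.foldl
    (fun (t : Int × Int) i =>
      (t.1 + |total - t.2|, t.2 + (need - PySem.List.pyGetD A i 0))) (0, 0)
  rs.1

-- ===== PRECONDITION & SPEC =====
-- Pre_ excludes exactly the inputs where A raises: N = 0 (ZeroDivisionError in sum(A)//N)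
-- and N > len(A) (IndexError at A[i]).
def Pre_solve (N : Int) (A : List Int) : Prop := N ≠ 0 ∧ N ≤ (A.length : Int)
instance (N : Int) (A : List Int) : Decidable (Pre_solve N A) := by unfold Pre_solve; infer_instance
def pvWitness_solve : Int × List Int := (2, [3, 1])
def Spec_solve (N : Int) (A : List Int) (out : Int) : Prop := out = solve_alt N A
instance (N : Int) (A : List Int) (out : Int) : Decidable (Spec_solve N A out) := by unfold Spec_solve; infer_instance

-- ===== CLAIM (what is proved, stated in full; the proofs are below) =====
def Claim_equal_solve : Prop := ∀ (N : Int) (A : List Int), Dom_solve N A → Pre_solve N A → Spec_solve N A (solve N A)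

-- ===== LEMMAS AND PROOFS =====

-- sum of gaps over the index interval [i, n) of A
def Sg (A : List Int) (need : Int) (i n : Nat) : Int :=
  (((A.take n).drop i).map (fun a => need - a)).sum

lemma sum_take_succ (A : List Int) (k : Nat) (hk : k < A.length) :
    (A.take (k + 1)).sum = (A.take k).sum + A[k] := by
  simpa using List.sum_take_succ A k hk

lemma Sg_succ (A : List Int) (need : Int) (i n : Nat) (hi : i ≤ n) (hn : n < A.length) :
    Sg A need i (n + 1) = Sg A need i n + (need - A[n]) := by
  unfold Sg
  rw [List.take_add_one, List.getElem?_eq_getElem hn]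
  rw [List.drop_append]
  have h0 : i - min n A.length = 0 := by omega
  simp [h0]

lemma Sg_empty (A : List Int) (need : Int) (n : Nat) : Sg A need n n = 0 := by
  unfold Sg
  rw [List.drop_eq_nil_of_le (by simp)]
  simp

lemma Sg_split (A : List Int) (need : Int) (i n : Nat) (hi : i ≤ n) :
    Sg A need 0 n = Sg A need 0 i + Sg A need i n := by
  unfold Sg
  have h : A.take n = A.take i ++ (A.take n).drop i := by
    conv_lhs => rw [← List.take_append_drop i (A.take n)]
    rw [List.take_take, Nat.min_eq_left hi]
  conv_lhs => rw [h]
  simp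

lemma Sg0_closed (A : List Int) (need : Int) (n : Nat) (hn : n ≤ A.length) :
    Sg A need 0 n = (n : Int) * need - (A.take n).sum := by
  induction n with
  | zero => simp [Sg]
  | succ k ih =>
    rw [Sg_succ A need 0 k (Nat.zero_le k) (by omega), ih (by omega),
      sum_take_succ A k (by omega)]
    push_cast
    ring

-- A's fold over range n, characterised
lemma a_fold (A : List Int) (need : Int) (n : Nat) (hn : n ≤ A.length) :
    ((List.range n).map (Nat.cast : Nat → Int)).foldl
      (fun (s : Int × Int) i =>
        (s.1 + |s.2 + (need - PySem.List.pyGetD A i 0)|, s.2 + (need - PySem.List.pyGetD A i 0)))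
      (0, 0)
      = (((List.range n).map (fun (j : Nat) => |((j : Int) + 1) * need - (A.take (j + 1)).sum|)).sum,
         (n : Int) * need - (A.take n).sum) := by
  induction n with
  | zero => simp
  | succ k ih =>
    have hk' : k < A.length := by omega
    have hget : PySem.List.pyGetD A ((k : Nat) : Int) 0 = A[k] := by
      simp [PySem.List.pyGetD_natCast, List.getD_eq_getElem?_getD, List.getElem?_eq_getElem hk']
    rw [List.range_succ, List.map_append, List.foldl_append, ih (by omega)]
    simp only [List.map_cons, List.map_nil, List.foldl_cons, List.foldl_nil, Prod.mk.injEq]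
    rw [hget]
    constructor
    · rw [List.map_append, List.sum_append]
      simp only [List.map_cons, List.map_nil, List.sum_cons, List.sum_nil]
      rw [sum_take_succ A k hk']
      have harg : (k : Int) * need - (A.take k).sum + (need - A[k])
          = ((k : Int) + 1) * need - ((A.take k).sum + A[k]) := by ring
      rw [harg]
      simp
    · rw [sum_take_succ A k hk']
      push_cast
      ring

-- B's reverse fold over range n, characterised via suffix gap sums
lemma b_fold (A : List Int) (need total : Int) (n : Nat) (hn : n ≤ A.length) (r s : Int) :
    ((List.range n).reverse.map (Nat.cast : Nat → Int)).foldl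
      (fun (t : Int × Int) i =>
        (t.1 + |total - t.2|, t.2 + (need - PySem.List.pyGetD A i 0))) (r, s)
      = (r + ((List.range n).map (fun m => |total - (s + Sg A need (n - m) n)|)).sum,
         s + Sg A need 0 n) := by
  induction n generalizing r s with
  | zero => simp [Sg]
  | succ k ih =>
    have hk' : k < A.length := by omega
    have hget : PySem.List.pyGetD A ((k : Nat) : Int) 0 = A[k] := by
      simp [PySem.List.pyGetD_natCast, List.getD_eq_getElem?_getD, List.getElem?_eq_getElem hk']
    conv_lhs => rw [List.range_succ, List.reverse_append]
    simp only [List.reverse_cons, List.reverse_nil, List.nil_append, List.cons_append,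
      List.map_cons, List.foldl_cons]
    rw [hget, ih (by omega)]
    simp only [Prod.mk.injEq]
    constructor
    · conv_rhs => rw [List.range_succ_eq_map]
      simp only [List.map_cons, List.sum_cons, List.map_map]
      have h0 : Sg A need (k + 1 - 0) (k + 1) = 0 := by
        simpa using Sg_empty A need (k + 1)
      rw [h0]
      have hmaps : (List.range k).map
            ((fun m => |total - (s + Sg A need (k + 1 - m) (k + 1))|) ∘ Nat.succ)
          = (List.range k).map
            (fun m => |total - (s + (need - A[k]) + Sg A need (k - m) k)|) := by
        apply List.map_congr_left
        intro m _
        simp only [Function.comp_apply, Nat.succ_eq_add_one, Nat.succ_sub_succ]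
        rw [Sg_succ A need (k - m) k (Nat.sub_le k m) hk']
        ring_nf
      rw [hmaps]
      ring_nf
    · rw [Sg_succ A need 0 k (Nat.zero_le k) hk']
      ring

-- reversing the order of summation over range n
lemma sum_range_rev (f : Nat → Int) (n : Nat) :
    ((List.range n).map (fun m => f (n - m))).sum
      = ((List.range n).map (fun m => f (m + 1))).sum := by
  induction n with
  | zero => simp
  | succ k ih =>
    conv_lhs => rw [List.range_succ_eq_map]
    simp only [List.map_cons, List.sum_cons, List.map_map]
    have h : (List.range k).map ((fun m => f (k + 1 - m)) ∘ Nat.succ)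
        = (List.range k).map (fun m => f (k - m)) := by
      apply List.map_congr_left
      intro m _
      simp [Nat.succ_sub_succ]
    rw [h, ih]
    conv_rhs => rw [List.range_succ]
    simp [add_comm]

-- B's total equals the full gap sum Sg 0 n
lemma total_eq (A : List Int) (need : Int) (n : Nat) (hn : n ≤ A.length) :
    ((List.range n).map (fun k => need - PySem.List.pyGetD A ((k : Nat) : Int) 0)).sum
      = Sg A need 0 n := by
  induction n with
  | zero => simp [Sg]
  | succ k ih =>
    have hk' : k < A.length := by omega
    have hget : PySem.List.pyGetD A ((k : Nat) : Int) 0 = A[k] := by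
      simp [PySem.List.pyGetD_natCast, List.getD_eq_getElem?_getD, List.getElem?_eq_getElem hk']
    rw [List.range_succ, List.map_append, List.sum_append, ih (by omega),
      Sg_succ A need 0 k (Nat.zero_le k) hk']
    simp only [List.map_cons, List.map_nil, List.sum_cons, List.sum_nil, add_zero]
    rw [hget]

-- ===== VERDICT (by name: the statement is the Claim_ definition above) =====
theorem solve_spec : Claim_equal_solve := by
  intro N A _hDom hPre
  simp only [Spec_solve, solve, solve_alt]
  rcases hPre with ⟨hN0, hNle⟩
  rcases lt_or_gt_of_ne hN0 with hneg | hpos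
  · rw [PySem.List.pyRange_one_eq_nil (by omega)]
    simp
  · obtain ⟨n, rfl⟩ : ∃ n : Nat, N = (n : Int) := ⟨N.toNat, (Int.toNat_of_nonneg (by omega)).symm⟩
    have hnlen : n ≤ A.length := by exact_mod_cast hNle
    rw [PySem.List.pyRange_zero_natCast]
    rw [a_fold A _ n hnlen]
    rw [← List.map_reverse]
    rw [b_fold A _ _ n hnlen 0 0]
    set need := PySem.Int.floordiv A.sum (n : Int) with hneed
    rw [List.map_map]
    have htot : ((List.range n).map ((fun i => need - PySem.List.pyGetD A i 0) ∘ (Nat.cast : Nat → Int))).sum = Sg A need 0 n := by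
      exact total_eq A need n hnlen
    rw [htot]
    simp only [zero_add]
    have hB : (List.range n).map (fun m => |Sg A need 0 n - Sg A need (n - m) n|)
        = (List.range n).map (fun m => (fun i => |Sg A need 0 i|) (n - m)) := by
      apply List.map_congr_left
      intro m _
      rw [Sg_split A need (n - m) n (Nat.sub_le n m)]
      ring_nf
    rw [hB, sum_range_rev (fun i => |Sg A need 0 i|) n]
    refine congrArg List.sum (List.map_congr_left ?_)
    intro j hj
    have hjn : j < n := List.mem_range.mp hj
    rw [Sg0_closed A need (j + 1) (by omega)]
    congr 1
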